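-- pv_equiv track=rewrite | github.com/sangwopa/baekjoon.py | programmers/햄버거만들기.py | solution
-- ===== SOURCE A (Python) =====
-- def solution(ingredient):
--     hamberger = [1,2,3,1]
--
--     answer = 0
--     n = 0
--     cnt = 0
--     div = []
--     if len(ingredient) < 4:
--         return 0
--     while 1:
--         if len(ingredient) < 4:
--             return answer
--         if n == (len(ingredient)):
--             break
--         if cnt == 4:
--             for i in range(-1, -5, -1):
--                 del ingredient[div[i]]
--             n = 0
--             div = []
--             cnt = 0
--             continue
--         if ingredient[n] == hamberger[cnt]:
--             if cnt == 3:
--                 answer += 1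
--             div.append(n)
--             cnt += 1
--             n += 1
--             continue
--         if ingredient[n] != hamberger[cnt]:
--             n += 1
--             cnt = 0
--             div = []
--             continue
--
--     return answer
-- ===== SOURCE B (Python) =====
-- def solution(ingredient):
--     pattern = [1, 2, 3, 1]
--     answer = 0
--     cnt = 0
--     for x in ingredient:
--         if x == pattern[cnt]:
--             cnt += 1
--             if cnt == 4:
--                 answer += 1
--                 cnt = 0
--         else:
--             cnt = 0
--     return answer
-- ===== Notes on version B (the rewrite author's own statement) =====
-- stated objective: faster
-- what changed: A repeatedly rescans the list from index 0 and deletes each found [1,2,3,1] block in place; B is a single left-to-right pass keeping only a pattern-position counter (A's non-retrying skip automaton never lets elements before a removed block combine with elements after it, so one pass with a reset suffices).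
import Mathlib
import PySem

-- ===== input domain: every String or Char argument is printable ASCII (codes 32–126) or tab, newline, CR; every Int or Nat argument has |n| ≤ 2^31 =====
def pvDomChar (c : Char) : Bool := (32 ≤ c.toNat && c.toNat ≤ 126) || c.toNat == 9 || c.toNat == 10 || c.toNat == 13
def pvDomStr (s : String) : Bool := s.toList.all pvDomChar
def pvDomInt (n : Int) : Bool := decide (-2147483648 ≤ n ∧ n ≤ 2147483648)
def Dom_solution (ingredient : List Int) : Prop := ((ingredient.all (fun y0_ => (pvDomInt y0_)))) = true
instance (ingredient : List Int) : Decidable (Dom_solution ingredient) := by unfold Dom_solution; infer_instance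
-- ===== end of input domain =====

-- B replaces A's rescan-from-zero-and-delete loop by a single left-to-right pass with a
-- pattern-position counter (A mutates its argument via `del`; the equivalence proved here is
-- about the return value only — B does not mutate).


-- ===== PORT A =====
-- hamberger = [1,2,3,1]
def patA : List Int := [1, 2, 3, 1]

-- one iteration of `for i in range(-1, -5, -1): del ingredient[div[i]]`
def delStep (div : List Nat) (acc : Option (List Int)) (i : Int) : Option (List Int) :=
  acc.bind (fun l =>
    (PySem.List.pyGet? div i).bind (fun d =>
      (PySem.List.pop? l (d : Int)).map Prod.snd))

-- the whole deletion loop (none = the Python would raise; unreachable from solution's states)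
def delAll (ing : List Int) (div : List Nat) : Option (List Int) :=
  (PySem.List.pyRange (-1) (-5) (-1)).foldl (delStep div) (some ing)

-- pop? strictly shrinks the list, cited by the termination proof below
theorem delStep_some {div : List Nat} {o : Option (List Int)} {i : Int} {l1 : List Int}
    (h : delStep div o i = some l1) : ∃ l0, o = some l0 ∧ l1.length + 1 = l0.length := by
  rcases o with _ | l0
  · simp [delStep] at h
  · refine ⟨l0, rfl, ?_⟩
    simp only [delStep, Option.bind_some] at h
    rcases hg : PySem.List.pyGet? div i with _ | d
    · rw [hg] at h; simp at h
    · rw [hg] at h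
      simp only [Option.bind_some] at h
      rcases hp : PySem.List.pop? l0 (d : Int) with _ | r
      · rw [hp] at h; simp at h
      · rw [hp] at h
        simp only [Option.map_some, Option.some.injEq] at h
        subst h
        exact PySem.List.length_of_pop?_eq_some l0 hp

theorem delFold_some : ∀ (is : List Int) (div : List Nat) (o : Option (List Int)) (res : List Int),
    List.foldl (delStep div) o is = some res →
    ∃ l, o = some l ∧ res.length + is.length = l.length := by
  intro is
  induction is with
  | nil => intro div o res h; exact ⟨res, by simpa using h, by simp⟩
  | cons i is ih =>
    intro div o res h
    simp only [List.foldl_cons] at h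
    obtain ⟨l1, h1, hlen1⟩ := ih div _ res h
    obtain ⟨l0, h0, hlen0⟩ := delStep_some h1
    exact ⟨l0, h0, by simp [List.length_cons] at *; omega⟩

theorem delAll_length {ing ing' : List Int} {div : List Nat}
    (h : delAll ing div = some ing') : ing'.length + 4 = ing.length := by
  unfold delAll at h
  obtain ⟨l, hl, hlen⟩ := delFold_some _ _ _ _ h
  simp only [Option.some.injEq] at hl
  subst hl
  simpa using hlen

-- the Python while-loop; state = (ingredient, answer, n, cnt, div)
def loopA (ing : List Int) (answer : Int) (n cnt : Nat) (div : List Nat) : Int :=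
  if ing.length < 4 then answer
  else if n = ing.length then answer
  else if cnt = 4 then
    match _hdel : delAll ing div with
    | none => answer          -- guard: here the Python raises IndexError (unreachable)
    | some ing' => loopA ing' answer 0 0 []
  else
    match hx : ing[n]? with
    | none => answer          -- guard: unreachable, the n == len(ingredient) check fired above
    | some x =>
      if x = patA.getD cnt 0 then    -- hamberger[cnt]; cnt < 4 here so getD is exact
        if cnt = 3 then loopA ing (answer + 1) (n + 1) (cnt + 1) (div ++ [n])
        else loopA ing answer (n + 1) (cnt + 1) (div ++ [n])
      else loopA ing answer (n + 1) 0 []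
termination_by (ing.length, ing.length - n)
decreasing_by
  · exact Prod.Lex.left _ _ (by have := delAll_length _hdel; omega)
  · exact Prod.Lex.right _ (by obtain ⟨hlt, -⟩ := List.getElem?_eq_some_iff.mp hx; omega)
  · exact Prod.Lex.right _ (by obtain ⟨hlt, -⟩ := List.getElem?_eq_some_iff.mp hx; omega)
  · exact Prod.Lex.right _ (by obtain ⟨hlt, -⟩ := List.getElem?_eq_some_iff.mp hx; omega)

def solution (ingredient : List Int) : Int :=
  if ingredient.length < 4 then 0
  else loopA ingredient 0 0 0 []

-- ===== PORT B =====
-- one step of B's for-loop; state = (answer, cnt)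
def stepB (s : Int × Nat) (x : Int) : Int × Nat :=
  if x = ([1, 2, 3, 1] : List Int).getD s.2 0 then    -- pattern[cnt]; cnt < 4 always
    if s.2 + 1 = 4 then (s.1 + 1, 0) else (s.1, s.2 + 1)
  else (s.1, 0)

def solution_alt (ingredient : List Int) : Int :=
  (ingredient.foldl stepB (0, 0)).1

-- ===== PRECONDITION & SPEC =====
def Spec_solution (ingredient : List Int) (out : Int) : Prop := out = solution_alt ingredient
instance (ingredient : List Int) (out : Int) : Decidable (Spec_solution ingredient out) := by unfold Spec_solution; infer_instance

-- ===== CLAIM (what is proved, stated in full; the proofs are below) =====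
def Claim_equal_solution : Prop := ∀ (ingredient : List Int), Dom_solution ingredient → Spec_solution ingredient (solution ingredient)

-- ===== LEMMAS AND PROOFS =====

-- B's answer accumulator is additive
theorem foldl_stepB_add (l : List Int) (a : Int) (c : Nat) :
    List.foldl stepB (a, c) l =
      (a + (List.foldl stepB (0, c) l).1, (List.foldl stepB (0, c) l).2) := by
  induction l generalizing a c with
  | nil => simp
  | cons x l ih =>
    rcases hs : stepB (0, c) x with ⟨d, c'⟩
    have hax : stepB (a, c) x = (a + d, c') := by
      unfold stepB at hs ⊢
      split_ifs at hs ⊢ <;> simp_all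
    simp only [List.foldl_cons, hax, hs]
    rw [ih, ih d c', ih 0 c']
    simp [add_assoc]

-- too few elements left: no burger completes
theorem foldl_stepB_short : ∀ (l : List Int) (c : Nat), l.length + c < 4 →
    (List.foldl stepB (0, c) l).1 = 0 := by
  intro l
  induction l with
  | nil => simp
  | cons x l ih =>
    intro c hc
    simp only [List.foldl_cons]
    rcases hs : stepB (0, c) x with ⟨d, c'⟩
    have : d = 0 ∧ c' ≤ c + 1 := by
      unfold stepB at hs
      split_ifs at hs <;> simp_all <;> omega
    obtain ⟨hd, hc'⟩ := this
    subst hd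
    rw [foldl_stepB_add]
    have := ih c' (by simp at hc; omega)
    omega

-- scanning a matched pattern prefix from state (0,0) lands in state (0,cnt)
theorem foldl_stepB_pat (cnt : Nat) (h : cnt ≤ 3) :
    List.foldl stepB (0, 0) (patA.take cnt) = (0, cnt) := by
  interval_cases cnt <;> decide

-- popping at the junction index removes exactly the element there
theorem pop_mid (u w : List Int) (b : Int) :
    PySem.List.pop? (u ++ b :: w) ((u.length : Int)) = some (b, u ++ w) := by
  rw [PySem.List.pop?_natCast (u ++ b :: w) u.length (by simp)]
  simp [List.eraseIdx_append_of_length_le (le_refl u.length),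
    List.getElem_append_right (le_refl u.length)]

-- the deletion loop removes exactly the four consecutive matched indices
theorem delAll_spec (ing : List Int) (j : Nat) (h : j + 3 < ing.length) :
    delAll ing (List.range' j 4) = some (ing.take j ++ ing.drop (j + 4)) := by
  obtain ⟨u, rest, hing, hu, hrest⟩ :
      ∃ u rest, ing = u ++ rest ∧ u.length = j ∧ 4 ≤ rest.length := by
    refine ⟨ing.take j, ing.drop j, (List.take_append_drop j ing).symm, ?_, ?_⟩ <;>
      simp <;> omega
  obtain ⟨b0, r0, hr0⟩ := List.exists_cons_of_ne_nil
    (l := rest) (by intro hE; rw [hE] at hrest; simp at hrest)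
  rw [hr0] at hrest
  obtain ⟨b1, r1, hr1⟩ := List.exists_cons_of_ne_nil
    (l := r0) (by intro hE; rw [hE] at hrest; simp at hrest)
  rw [hr1] at hrest
  obtain ⟨b2, r2, hr2⟩ := List.exists_cons_of_ne_nil
    (l := r1) (by intro hE; rw [hE] at hrest; simp at hrest)
  rw [hr2] at hrest
  obtain ⟨b3, w, hr3⟩ := List.exists_cons_of_ne_nil
    (l := r2) (by intro hE; rw [hE] at hrest; simp at hrest)
  subst hr3; subst hr2; subst hr1; subst hr0; subst hing; subst hu
  have hdiv : List.range' u.length 4 =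
      [u.length, u.length + 1, u.length + 2, u.length + 3] := by
    simp [List.range']
  have p3 : PySem.List.pop? (u ++ b0 :: b1 :: b2 :: b3 :: w) ((u.length + 3 : Nat) : Int)
      = some (b3, u ++ b0 :: b1 :: b2 :: w) := by
    have := pop_mid (u ++ [b0, b1, b2]) w b3
    simpa using this
  have p2 : PySem.List.pop? (u ++ b0 :: b1 :: b2 :: w) ((u.length + 2 : Nat) : Int)
      = some (b2, u ++ b0 :: b1 :: w) := by
    have := pop_mid (u ++ [b0, b1]) w b2
    simpa using this
  have p1 : PySem.List.pop? (u ++ b0 :: b1 :: w) ((u.length + 1 : Nat) : Int)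
      = some (b1, u ++ b0 :: w) := by
    have := pop_mid (u ++ [b0]) w b1
    simpa using this
  have p0 : PySem.List.pop? (u ++ b0 :: w) ((u.length : Nat) : Int)
      = some (b0, u ++ w) := pop_mid u w b0
  have g1 : PySem.List.pyGet? [u.length, u.length+1, u.length+2, u.length+3] (-1)
      = some (u.length + 3) := by simp [PySem.List.pyGet?, PySem.List.pyIdx?]
  have g2 : PySem.List.pyGet? [u.length, u.length+1, u.length+2, u.length+3] (-2)
      = some (u.length + 2) := by simp [PySem.List.pyGet?, PySem.List.pyIdx?]
  have g3 : PySem.List.pyGet? [u.length, u.length+1, u.length+2, u.length+3] (-3)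
      = some (u.length + 1) := by simp [PySem.List.pyGet?, PySem.List.pyIdx?]
  have g4 : PySem.List.pyGet? [u.length, u.length+1, u.length+2, u.length+3] (-4)
      = some u.length := by simp [PySem.List.pyGet?, PySem.List.pyIdx?]
  have htake : (u ++ b0 :: b1 :: b2 :: b3 :: w).take u.length = u := by simp
  have hdrop : (u ++ b0 :: b1 :: b2 :: b3 :: w).drop (u.length + 4) = w := by
    simp
  rw [htake, hdrop, hdiv]
  unfold delAll
  rw [show PySem.List.pyRange (-1) (-5) (-1) = [-1, -2, -3, -4] from by decide]
  simp only [List.foldl_cons, List.foldl_nil]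
  simp only [delStep, Option.bind_some, g1, g2, g3, g4, p0, p1, p2, p3,
    Option.map_some]

-- A's inner run (no deletion yet) computes B's fold over the unscanned suffix
theorem loopA_run (ing : List Int)
    (IH : ∀ ing' : List Int, ing'.length < ing.length →
      ∀ a, loopA ing' a 0 0 [] = a + (List.foldl stepB (0, 0) ing').1)
    (hlen : 4 ≤ ing.length) :
    ∀ (k n cnt : Nat) (a : Int), ing.length - n = k → n ≤ ing.length → cnt ≤ 3 → cnt ≤ n →
      List.foldl stepB (0, 0) (ing.take (n - cnt)) = (0, 0) →
      (ing.take n).drop (n - cnt) = patA.take cnt →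
      loopA ing a n cnt (List.range' (n - cnt) cnt) =
        a + (List.foldl stepB (0, cnt) (ing.drop n)).1 := by
  intro k
  induction k with
  | zero =>
    intro n cnt a hk hn hc hcn hpre hseg
    have hnl : n = ing.length := by omega
    subst hnl
    rw [loopA]
    rw [if_neg (show ¬ ing.length < 4 from by omega), if_pos rfl]
    rw [List.drop_length]
    simp
  | succ k ihk =>
    intro n cnt a hk hn hc hcn hpre hseg
    have hnl : n < ing.length := by omega
    have hx : ing[n]? = some ing[n] := List.getElem?_eq_getElem hnl
    -- the matched prefix decomposition, used by every branch
    have htn : ing.take n = ing.take (n - cnt) ++ patA.take cnt := by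
      conv_lhs => rw [← List.take_append_drop (n - cnt) (ing.take n)]
      rw [List.take_take, min_eq_left (by omega : n - cnt ≤ n), hseg]
    have hFn : List.foldl stepB (0, 0) (ing.take n) = (0, cnt) := by
      rw [htn, List.foldl_append, hpre, foldl_stepB_pat cnt hc]
    have hdropn : ing.drop n = ing[n] :: ing.drop (n + 1) :=
      List.drop_eq_getElem_cons hnl
    rw [loopA]
    rw [if_neg (show ¬ ing.length < 4 from by omega),
      if_neg (show ¬ n = ing.length from by omega),
      if_neg (show ¬ cnt = 4 from by omega)]
    split
    · next heq => rw [hx] at heq; exact absurd heq (by simp)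
    next x heq =>
      rw [hx] at heq
      injection heq with heq
      subst heq
      by_cases hmatch : ing[n] = patA.getD cnt 0
      · rw [if_pos hmatch]
        by_cases h3 : cnt = 3
        · subst h3
          rw [if_pos (rfl : (3 : Nat) = 3)]
          have hone : ing[n] = 1 := by simpa [patA] using hmatch
          have hdiv : List.range' (n - 3) 3 ++ [n] = List.range' (n - 3) 4 := by
            conv_rhs => rw [List.range'_1_concat]
            rw [show n - 3 + 3 = n from by omega]
          rw [hdiv]
          rw [loopA]
          rw [if_neg (show ¬ ing.length < 4 from by omega)]
          by_cases hend : n + 1 = ing.length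
          · rw [if_pos hend]
            rw [hdropn, List.foldl_cons]
            have : ing.drop (n + 1) = [] := by rw [hend]; exact List.drop_length
            rw [this]
            simp [stepB, hone]
          · rw [if_neg hend, if_pos (rfl : (3 : Nat) + 1 = 4)]
            have hda : delAll ing (List.range' (n - 3) 4)
                = some (ing.take (n - 3) ++ ing.drop (n - 3 + 4)) :=
              delAll_spec ing (n - 3) (by omega)
            have hidx : n - 3 + 4 = n + 1 := by omega
            rw [hidx] at hda
            split
            · next heq => rw [hda] at heq; exact absurd heq (by simp)
            next ing' heq =>
              rw [hda] at heq
              injection heq with heq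
              subst heq
              have hlt : (ing.take (n - 3) ++ ing.drop (n + 1)).length < ing.length := by
                simp
                omega
              rw [IH _ hlt (a + 1)]
              rw [List.foldl_append, hpre]
              rw [hdropn, List.foldl_cons]
              have hstep : stepB (0, 3) ing[n] = (1, 0) := by simp [stepB, hone]
              rw [hstep]
              conv_rhs => rw [foldl_stepB_add]
              simp
              ring
        · rw [if_neg h3]
          have hdiv : List.range' (n - cnt) cnt ++ [n]
              = List.range' (n + 1 - (cnt + 1)) (cnt + 1) := by
            rw [show n + 1 - (cnt + 1) = n - cnt from by omega]
            conv_rhs => rw [List.range'_1_concat]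
            rw [show n - cnt + cnt = n from by omega]
          rw [hdiv]
          rw [ihk (n + 1) (cnt + 1) a (by omega) (by omega) (by omega) (by omega)
            (by rw [show n + 1 - (cnt + 1) = n - cnt from by omega]; exact hpre)
            (by
              rw [show n + 1 - (cnt + 1) = n - cnt from by omega]
              rw [List.take_add_one, hx]
              simp only [Option.toList_some]
              rw [List.drop_append_of_le_length (by simp; omega), hseg]
              have : patA.take cnt ++ [patA.getD cnt 0] = patA.take (cnt + 1) := by
                interval_cases cnt <;> simp [patA]
              rw [hmatch, this])]
          rw [hdropn, List.foldl_cons]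
          have hstep : stepB (0, cnt) ing[n] = (0, cnt + 1) := by
            simp only [stepB]
            rw [if_pos (by simpa [patA] using hmatch), if_neg (by omega)]
          rw [hstep]
      · rw [if_neg hmatch]
        have hstep : stepB (0, cnt) ing[n] = (0, 0) := by
          simp only [stepB]
          rw [if_neg (by simpa [patA] using hmatch)]
        rw [show ([] : List Nat) = List.range' (n + 1 - 0) 0 from rfl]
        rw [ihk (n + 1) 0 a (by omega) (by omega) (by omega) (by omega)
          (by
            rw [show n + 1 - 0 = n + 1 from rfl]
            rw [List.take_add_one, hx]
            simp only [Option.toList_some]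
            rw [List.foldl_append, hFn]
            simpa using hstep)
          (by simp)]
        rw [hdropn, List.foldl_cons, hstep]

theorem loopA_eq : ∀ (N : Nat) (ing : List Int), ing.length ≤ N →
    ∀ a, loopA ing a 0 0 [] = a + (List.foldl stepB (0, 0) ing).1 := by
  intro N
  induction N with
  | zero =>
    intro ing hN a
    have h0 : ing.length < 4 := by omega
    rw [loopA]
    simp only [h0, if_true]
    rw [foldl_stepB_short ing 0 (by omega)]
    ring
  | succ N ih =>
    intro ing hN a
    by_cases hlen : ing.length < 4
    · rw [loopA]
      simp only [hlen, if_true]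
      rw [foldl_stepB_short ing 0 (by omega)]
      ring
    · have := loopA_run ing
        (fun ing' hlt a => ih ing' (by omega) a) (by omega)
        (ing.length) 0 0 a (by omega) (by omega) (by omega) (by omega)
        (by simp) (by simp)
      simpa using this

-- ===== VERDICT (by name: the statement is the Claim_ definition above) =====
theorem solution_spec : Claim_equal_solution := by
  intro ing _
  unfold Spec_solution solution solution_alt
  by_cases h : ing.length < 4
  · simp only [h, if_true]
    rw [foldl_stepB_short ing 0 (by omega)]
  · simp only [h, if_false]
    rw [loopA_eq ing.length ing le_rfl 0]
    ring
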